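-- pv_equiv track=rewrite | github.com/prabowo02/toki-regular-open-contest | troc-16/troc-16-multiple/solution-prabowo.py | get_largest_prime_divisors
-- ===== SOURCE A (Python) =====
-- def get_largest_prime_divisors(N):
--     prime_divisors = [1 for i in range(N)]
--     for i in range(2, N):
--         if prime_divisors[i] != 1:
--             continue
--
--         for j in range(i, N, i):
--             prime_divisors[j] = i
--
--     return prime_divisors
-- ===== SOURCE B (Python) =====
-- def get_largest_prime_divisors(N):
--     spf = list(range(N))
--     i = 2
--     while i * i < N:
--         if spf[i] == i:
--             for j in range(i * i, N, i):
--                 if spf[j] == j: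
--                     spf[j] = i
--         i += 1
--     result = [1] * N
--     for n in range(2, N):
--         result[n] = max(spf[n], result[n // spf[n]])
--     return result
-- ===== Notes on version B (the rewrite author's own statement) =====
-- stated objective: alternative
-- what changed: Replaces A's cross-off sieve (each prime overwrites the slot of every multiple, leaving the largest prime) by a smallest-prime-factor sieve (first write wins, starting at i*i) followed by a dynamic-programming pass result[n] = max(spf[n], result[n // spf[n]]).
import Mathlib
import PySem

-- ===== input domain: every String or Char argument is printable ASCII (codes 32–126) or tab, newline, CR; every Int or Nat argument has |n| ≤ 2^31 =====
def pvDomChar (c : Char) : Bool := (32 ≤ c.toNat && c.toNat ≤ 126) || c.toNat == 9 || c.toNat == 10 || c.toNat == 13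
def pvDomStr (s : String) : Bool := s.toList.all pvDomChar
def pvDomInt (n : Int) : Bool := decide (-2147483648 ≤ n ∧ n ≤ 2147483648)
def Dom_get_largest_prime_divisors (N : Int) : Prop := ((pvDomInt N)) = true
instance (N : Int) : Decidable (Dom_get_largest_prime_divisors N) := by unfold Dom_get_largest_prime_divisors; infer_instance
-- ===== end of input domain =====

-- B replaces A's largest-prime cross-off sieve by a smallest-prime-factor sieve plus a
-- dynamic-programming pass result[n] = max(spf[n], result[n // spf[n]]) (objective: alternative).

-- ===== PORT A =====
-- Literal port of A's sieve: all-ones array, for i in range(2,N): if pd[i]!=1 continue,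
-- else set pd[j]=i for j in range(i,N,i).
def get_largest_prime_divisors (N : Int) : List Int :=
  let pd : List Int := (PySem.List.pyRange 0 N).map (fun _ => (1 : Int))
  (PySem.List.pyRange 2 N).foldl
    (fun pd i =>
      if PySem.List.pyGet? pd i ≠ some 1 then pd
      else (PySem.List.pyRange i N i).foldl (fun pd j => pd.set j.toNat i) pd)
    pd

-- ===== PORT B =====
-- Outer `while i*i < N` of Source B building the smallest-prime-factor table in place.
def pvSpfLoop (N i : Int) (spf : List Int) : List Int :=
  if h : i * i < N then
    pvSpfLoop N (i + 1)
      (if PySem.List.pyGet? spf i = some i then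
        (PySem.List.pyRange (i * i) N i).foldl
          (fun spf j => if PySem.List.pyGet? spf j = some j then spf.set j.toNat i else spf) spf
      else spf)
  else spf
termination_by (N - i).toNat
decreasing_by
  have hi : i < N := by
    by_cases h0 : i ≤ 0
    · nlinarith [mul_self_nonneg i]
    · nlinarith
  omega

def get_largest_prime_divisors_alt (N : Int) : List Int :=
  let spf := pvSpfLoop N 2 (PySem.List.pyRange 0 N)
  (PySem.List.pyRange 2 N).foldl
    (fun res n =>
      let p := (PySem.List.pyGet? spf n).getD 0
      res.set n.toNat (max p ((PySem.List.pyGet? res (PySem.Int.floordiv n p)).getD 0)))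
    (List.replicate N.toNat 1)

-- ===== PRECONDITION & SPEC =====
def Spec_get_largest_prime_divisors (N : Int) (out : List Int) : Prop := out = get_largest_prime_divisors_alt N
instance (N : Int) (out : List Int) : Decidable (Spec_get_largest_prime_divisors N out) := by unfold Spec_get_largest_prime_divisors; infer_instance

-- ===== CLAIM (what is proved, stated in full; the proofs are below) =====
def Claim_equal_get_largest_prime_divisors : Prop := ∀ (N : Int), Dom_get_largest_prime_divisors N → Spec_get_largest_prime_divisors N (get_largest_prime_divisors N)

-- ===== LEMMAS AND PROOFS =====

-- Common spec: pvG k j = the largest prime p ≤ k with p ∣ j, or 1 if there is none.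
def pvG : Nat → Nat → Nat
  | 0, _ => 1
  | k+1, j => if Nat.Prime (k+1) ∧ (k+1) ∣ j then k+1 else pvG k j

-- pvG basics
theorem pvG_stab (a b j : Nat) (hba : b ≤ a)
    (h : ∀ p, b < p → p ≤ a → ¬(Nat.Prime p ∧ p ∣ j)) : pvG a j = pvG b j := by
  induction a with
  | zero => have : b = 0 := by omega
            rw [this]
  | succ a ih =>
      rcases Nat.eq_or_lt_of_le hba with hba' | hba'
      · rw [hba']
      · have h1 : ¬ (Nat.Prime (a+1) ∧ (a+1) ∣ j) := h (a+1) (by omega) (by omega)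
        rw [pvG, if_neg h1]
        exact ih (by omega) (fun p hb hp => h p hb (by omega))

theorem pvG_eq_self (k j : Nat) (hj : 1 ≤ j) (hk : j ≤ k) : pvG k j = pvG j j := by
  apply pvG_stab _ _ _ hk
  rintro p hb _ ⟨hp, hd⟩
  exact absurd (Nat.le_of_dvd (by omega) hd) (by omega)

theorem pvG_prime_self (q j : Nat) (hq : Nat.Prime q) (hd : q ∣ j) : pvG q j = q := by
  obtain ⟨k, rfl⟩ : ∃ k, q = k + 1 := ⟨q - 1, by have := hq.two_le; omega⟩
  rw [pvG, if_pos ⟨hq, hd⟩]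

theorem pvG_eq_of (k j q : Nat) (hq : Nat.Prime q) (hd : q ∣ j) (hqk : q ≤ k)
    (hmax : ∀ p, q < p → p ≤ k → ¬(Nat.Prime p ∧ p ∣ j)) : pvG k j = q := by
  rw [pvG_stab k q j hqk hmax]
  exact pvG_prime_self q j hq hd

theorem pvG_ne_one (k j p : Nat) (hp : Nat.Prime p) (hd : p ∣ j) (hpk : p ≤ k) :
    pvG k j ≠ 1 := by
  induction k with
  | zero => exact absurd hpk (by have := hp.two_le; omega)
  | succ k ih =>
      rw [pvG]
      split
      · have := hp.two_le; omega
      · rename_i hcond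
        have hne : p ≠ k + 1 := fun he => hcond (he ▸ ⟨hp, hd⟩)
        exact ih (by omega)

theorem pvG_pred_eq_one_iff (i : Nat) (hi : 2 ≤ i) : pvG (i-1) i = 1 ↔ Nat.Prime i := by
  constructor
  · intro h1
    by_contra hnp
    have hm := Nat.minFac_dvd i
    have hmp : Nat.Prime i.minFac := Nat.minFac_prime (by omega)
    have hlt : i.minFac ≠ i := fun he => hnp (Nat.prime_def_minFac.mpr ⟨hi, he⟩)
    have hle : i.minFac ≤ i := Nat.le_of_dvd (by omega) hm
    exact pvG_ne_one (i-1) i i.minFac hmp hm (by omega) h1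
  · intro hp
    rw [pvG_stab (i-1) 0 i (by omega)]
    · rfl
    · rintro p h0 hle ⟨hpp, hpd⟩
      have : p = i := (Nat.Prime.eq_one_or_self_of_dvd hp p hpd).resolve_left (by have := hpp.two_le; omega)
      omega

-- the common target list
def pvTarget (n : Nat) : List Int := (List.range n).map (fun j => (pvG j j : Int))

-- generic pointwise description of folding `set` over a list of nonneg Int indices
theorem foldl_setv (xs : List Int) (v : Int → Int) (pd : List Int)
    (hx : ∀ j ∈ xs, 0 ≤ j) (t : Nat) :
    (xs.foldl (fun pd j => pd.set j.toNat (v j)) pd)[t]? =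
      if (t : Int) ∈ xs ∧ t < pd.length then some (v (t : Int)) else pd[t]? := by
  induction xs generalizing pd with
  | nil => simp
  | cons x xs ih =>
      have hx0 : 0 ≤ x := hx x (by simp)
      rw [List.foldl_cons, ih _ (fun j hj => hx j (List.mem_cons_of_mem _ hj))]
      rw [List.length_set, List.getElem?_set]
      by_cases hlt : t < pd.length
      · by_cases hmem : (t : Int) ∈ xs
        · simp [hmem, hlt]
        · by_cases heq : x = (t : Int)
          · have h1 : x.toNat = t := by omega
            simp [hmem, heq, h1, hlt]
          · have h1 : x.toNat ≠ t := by omega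
            have h2 : ¬ ((t : Int) = x) := fun h => heq h.symm
            simp [hmem, heq, h1, h2, hlt]
      · have hnone : pd[t]? = none := List.getElem?_eq_none (by omega)
        by_cases hmem : (t : Int) ∈ xs <;> by_cases heq : x.toNat = t <;>
          simp [hmem, heq, hlt, hnone]

-- A-side: the sieve state after the outer loop has processed i = 2..k
def pvStateA (n k : Nat) : List Int :=
  (List.range n).map (fun j => if j = 0 then 1 else (pvG k j : Int))

theorem pvG_one_left (j : Nat) : pvG 1 j = 1 := by
  simp [pvG, Nat.not_prime_one]

theorem pvStateA_getElem? (n k t : Nat) :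
    (pvStateA n k)[t]? = if t < n then some (if t = 0 then (1:Int) else (pvG k t : Int)) else none := by
  simp only [pvStateA, List.getElem?_map]
  by_cases h : t < n
  · rw [List.getElem?_range h]
    simp [h]
  · rw [List.getElem?_eq_none (by simp [List.length_range]; omega)]
    simp [h]

theorem pvStateA_length (n k : Nat) : (pvStateA n k).length = n := by
  simp [pvStateA]

theorem initA (N : Int) : (PySem.List.pyRange 0 N).map (fun _ => (1:Int)) = pvStateA N.toNat 1 := by
  have hlen : (PySem.List.pyRange 0 N).length = N.toNat := by
    rw [PySem.List.pyRange_of_pos 0 N (by norm_num)]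
    simp only [List.length_map, List.length_range]
    split_ifs with h
    · simp
    · omega
  apply List.ext_getElem?
  intro t
  rw [pvStateA_getElem?]
  by_cases hlt : t < N.toNat
  · rw [List.getElem?_map, if_pos hlt]
    have : t < (PySem.List.pyRange 0 N).length := by omega
    rw [List.getElem?_eq_getElem this]
    by_cases ht0 : t = 0 <;> simp [ht0, pvG_one_left]
  · rw [List.getElem?_map, if_neg hlt, List.getElem?_eq_none (by omega)]
    rfl

theorem pvStateA_not_prime (n k : Nat) (hk : 1 ≤ k) (hp : ¬ Nat.Prime k) :
    pvStateA n (k-1) = pvStateA n k := by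
  have hstep : ∀ j, pvG k j = pvG (k-1) j := by
    intro j
    obtain ⟨k', rfl⟩ : ∃ k', k = k' + 1 := ⟨k-1, by omega⟩
    rw [pvG, if_neg (fun hc => hp hc.1)]
    simp
  simp [pvStateA, hstep]

theorem innerA (N : Int) (i : Nat) (hi : 2 ≤ i) (hiN : (i:Int) < N) (hp : Nat.Prime i) :
    (PySem.List.pyRange i N i).foldl (fun pd j => pd.set j.toNat (i:Int))
      (pvStateA N.toNat (i-1)) = pvStateA N.toNat i := by
  apply List.ext_getElem?
  intro t
  have hipos : (0:Int) < i := by omega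
  rw [foldl_setv _ _ _ (fun j hj => by
    have := (PySem.List.mem_pyRange_iff_of_pos hipos j).mp hj; omega)]
  rw [pvStateA_length, pvStateA_getElem?, pvStateA_getElem?]
  by_cases hlt : t < N.toNat
  · by_cases hdvd : i ∣ t ∧ i ≤ t
    · have hm : ((t:Nat):Int) ∈ PySem.List.pyRange i N i :=
        (PySem.List.mem_pyRange_iff_of_pos hipos _).mpr
          ⟨by exact_mod_cast hdvd.2, by omega, dvd_sub_self_right.mpr (by exact_mod_cast hdvd.1)⟩
      rw [if_pos ⟨hm, hlt⟩, if_pos hlt]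
      have ht0 : ¬ t = 0 := by have := hdvd.2; omega
      rw [if_neg ht0, pvG_prime_self i t hp hdvd.1]
    · have hm : ((t:Nat):Int) ∉ PySem.List.pyRange i N i := fun hc => by
        obtain ⟨ha, hb, hc'⟩ := (PySem.List.mem_pyRange_iff_of_pos hipos _).mp hc
        have h1 : i ∣ t := by exact_mod_cast dvd_sub_self_right.mp hc'
        have h2 : i ≤ t := by exact_mod_cast ha
        exact hdvd ⟨h1, h2⟩
      rw [if_neg (fun hcc => hm hcc.1), if_pos hlt, if_pos hlt]
      by_cases ht0 : t = 0
      · simp [ht0]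
      · rw [if_neg ht0, if_neg ht0]
        have hnd : ¬ i ∣ t := fun hc => hdvd ⟨hc, Nat.le_of_dvd (by omega) hc⟩
        have : pvG i t = pvG (i-1) t := by
          obtain ⟨k', rfl⟩ : ∃ k', i = k' + 1 := ⟨i-1, by omega⟩
          rw [pvG, if_neg (fun hc => hnd hc.2)]
          simp
        rw [this]
  · rw [if_neg (fun hc => absurd hc.2 (by omega)), if_neg hlt, if_neg hlt]

theorem outerA (N : Int) : ∀ b : Int, 2 ≤ b → b ≤ N →
    (PySem.List.pyRange 2 b).foldl
      (fun pd i =>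
        if PySem.List.pyGet? pd i ≠ some 1 then pd
        else (PySem.List.pyRange i N i).foldl (fun pd j => pd.set j.toNat i) pd)
      (pvStateA N.toNat 1) = pvStateA N.toNat (b-1).toNat := by
  intro b hb
  induction b, hb using Int.le_induction with
  | base =>
      intro _
      rw [PySem.List.pyRange_of_pos 2 2 (by norm_num), if_neg (by omega)]
      rfl
  | succ b hb ih =>
      intro hbN
      rw [PySem.List.pyRange_one_succ_right (by omega), List.foldl_append, ih (by omega)]
      simp only [List.foldl_cons, List.foldl_nil]
      obtain ⟨nb, rfl⟩ : ∃ nb : Nat, b = (nb : Int) := ⟨b.toNat, by omega⟩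
      have hnb2 : 2 ≤ nb := by exact_mod_cast hb
      have hnbN : (nb : Int) < N := by omega
      have h1 : ((nb:Int) - 1).toNat = nb - 1 := by omega
      have h2 : ((nb:Int) + 1 - 1).toNat = nb := by omega
      rw [h1, h2, PySem.List.pyGet?_natCast, pvStateA_getElem?]
      have hlt : nb < N.toNat := by omega
      rw [if_pos hlt, if_neg (by omega : ¬ nb = 0)]
      by_cases hp : Nat.Prime nb
      · have hg1 : pvG (nb-1) nb = 1 := (pvG_pred_eq_one_iff nb hnb2).mpr hp
        rw [hg1, if_neg (by simp)]
        exact innerA N nb hnb2 hnbN hp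
      · have hg1 : pvG (nb-1) nb ≠ 1 := fun hc => hp ((pvG_pred_eq_one_iff nb hnb2).mp hc)
        rw [if_pos (by simpa using fun hc => hg1 (by exact_mod_cast hc))]
        exact pvStateA_not_prime N.toNat nb (by omega) hp

theorem portA_eq (N : Int) : get_largest_prime_divisors N = pvTarget N.toNat := by
  have hrfl : get_largest_prime_divisors N =
      (PySem.List.pyRange 2 N).foldl
        (fun pd i =>
          if PySem.List.pyGet? pd i ≠ some 1 then pd
          else (PySem.List.pyRange i N i).foldl (fun pd j => pd.set j.toNat i) pd)
        ((PySem.List.pyRange 0 N).map (fun _ => (1:Int))) := rfl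
  by_cases hN2 : 2 ≤ N
  · rw [hrfl, initA, outerA N N (by omega) le_rfl]
    apply List.ext_getElem?
    intro t
    rw [pvStateA_getElem?]
    unfold pvTarget
    by_cases hlt : t < N.toNat
    · rw [List.getElem?_map, List.getElem?_range hlt, if_pos hlt]
      simp only [Option.map_some]
      by_cases ht0 : t = 0
      · subst ht0; rfl
      · rw [if_neg ht0]
        have : pvG ((N-1).toNat) t = pvG t t :=
          pvG_eq_self _ t (by omega) (by omega)
        rw [this]
    · rw [List.getElem?_map, List.getElem?_eq_none (by simp [List.length_range]; omega), if_neg hlt]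
      rfl
  · have hre : PySem.List.pyRange 2 N = [] := by
      rw [PySem.List.pyRange_of_pos 2 N (by norm_num), if_neg (by omega)]
      rfl
    rw [hrfl, hre, List.foldl_nil, initA]
    apply List.ext_getElem?
    intro t
    rw [pvStateA_getElem?]
    unfold pvTarget
    by_cases hlt : t < N.toNat
    · have ht0 : t = 0 := by omega
      subst ht0
      rw [List.getElem?_map, List.getElem?_range hlt, if_pos hlt]
      rfl
    · rw [List.getElem?_map, List.getElem?_eq_none (by simp [List.length_range]; omega), if_neg hlt]
      rfl

-- B-side: pvG extremal characterisation
theorem pvG_cases (k j : Nat) :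
    pvG k j = 1 ∨ ((pvG k j).Prime ∧ pvG k j ∣ j ∧ pvG k j ≤ k) := by
  induction k with
  | zero => exact Or.inl rfl
  | succ k ih =>
      rw [pvG]
      split
      · rename_i hc
        exact Or.inr ⟨hc.1, hc.2, le_refl _⟩
      · rcases ih with h1 | ⟨hp, hd, hk⟩
        · exact Or.inl h1
        · exact Or.inr ⟨hp, hd, by omega⟩

theorem pvG_ge (k j r : Nat) (hr : Nat.Prime r) (hd : r ∣ j) (hk : r ≤ k) : r ≤ pvG k j := by
  induction k with
  | zero => exact absurd hk (by have := hr.two_le; omega)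
  | succ k ih =>
      rw [pvG]
      split
      · exact hk
      · rename_i hc
        have : r ≠ k + 1 := fun he => hc (he ▸ ⟨hr, hd⟩)
        exact ih (by omega)

theorem pvG_self_spec (j : Nat) (hj : 2 ≤ j) :
    (pvG j j).Prime ∧ pvG j j ∣ j ∧ ∀ r, Nat.Prime r → r ∣ j → r ≤ pvG j j := by
  have hne1 := pvG_ne_one j j j.minFac (Nat.minFac_prime (by omega)) (Nat.minFac_dvd j)
    (Nat.minFac_le (by omega))
  rcases pvG_cases j j with h1 | ⟨hp, hd, _⟩
  · exact absurd h1 hne1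
  · exact ⟨hp, hd, fun r hr hrd => pvG_ge j j r hr hrd (Nat.le_of_dvd (by omega) hrd)⟩

-- the DP recurrence: largest prime factor of n = max(minFac n, lpf (n / minFac n))
theorem pvG_key (n : Nat) (hn : 2 ≤ n) :
    pvG n n = max n.minFac (pvG (n / n.minFac) (n / n.minFac)) := by
  have hp : n.minFac.Prime := Nat.minFac_prime (by omega)
  have hpd : n.minFac ∣ n := Nat.minFac_dvd n
  have hmn : (n / n.minFac) ∣ n := Nat.div_dvd_of_dvd hpd
  have hnm : n = n.minFac * (n / n.minFac) := (Nat.mul_div_cancel' hpd).symm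
  by_cases hm1 : n / n.minFac = 1
  · have hmfe : n.minFac = n := by
      have h := hnm
      rw [hm1, Nat.mul_one] at h
      omega
    have hprime : n.Prime := Nat.prime_def_minFac.mpr ⟨hn, hmfe⟩
    rw [hm1, pvG_one_left, pvG_prime_self n n hprime dvd_rfl, hmfe]
    omega
  · have hm2 : 2 ≤ n / n.minFac := by
      have h1 : 1 ≤ n / n.minFac := Nat.div_pos (Nat.minFac_le (by omega)) hp.pos
      omega
    obtain ⟨hq, hqd, hqmax⟩ := pvG_self_spec (n / n.minFac) hm2
    apply pvG_eq_of n n _ ?_ ?_ ?_ ?_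
    · rcases max_choice n.minFac (pvG (n / n.minFac) (n / n.minFac)) with h | h <;> rw [h]
      · exact hp
      · exact hq
    · rcases max_choice n.minFac (pvG (n / n.minFac) (n / n.minFac)) with h | h <;> rw [h]
      · exact hpd
      · exact hqd.trans hmn
    · rcases max_choice n.minFac (pvG (n / n.minFac) (n / n.minFac)) with h | h <;> rw [h]
      · exact Nat.le_of_dvd (by omega) hpd
      · exact Nat.le_of_dvd (by omega) (hqd.trans hmn)
    · rintro r hlo hhi ⟨hr, hrd⟩
      have : r ∣ n.minFac * (n / n.minFac) := by rw [← hnm]; exact hrd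
      rcases (Nat.Prime.dvd_mul hr).mp this with hc | hc
      · have : r = n.minFac := (Nat.prime_dvd_prime_iff_eq hr hp).mp hc
        omega
      · have := hqmax r hr hc
        omega

-- pointwise description of the guarded-set fold (writes v where the entry still equals its index)
theorem foldl_cset (xs : List Int) (v : Int) (pd : List Int)
    (hx : ∀ j ∈ xs, 0 ≤ j) (hnd : xs.Nodup) (t : Nat) :
    (xs.foldl (fun pd j => if PySem.List.pyGet? pd j = some j then pd.set j.toNat v else pd) pd)[t]? =
      if (t : Int) ∈ xs ∧ pd[t]? = some (t : Int) then some v else pd[t]? := by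
  induction xs generalizing pd with
  | nil => simp
  | cons x xs ih =>
      have hx0 : 0 ≤ x := hx x (by simp)
      obtain ⟨nx, rfl⟩ : ∃ nx : Nat, x = (nx : Int) := ⟨x.toNat, by omega⟩
      rw [List.foldl_cons, ih _ (fun j hj => hx j (List.mem_cons_of_mem _ hj)) hnd.of_cons]
      rw [PySem.List.pyGet?_natCast]
      simp only [Int.toNat_natCast]
      by_cases hg : pd[nx]? = some ((nx : Nat) : Int)
      · rw [if_pos hg]
        by_cases hmem : ((t : Nat) : Int) ∈ xs
        · have hne : nx ≠ t := by
            intro he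
            exact (List.nodup_cons.mp hnd).1 (by rw [he]; exact hmem)
          rw [List.getElem?_set, if_neg hne]
          simp [hmem]
        · by_cases heq : nx = t
          · subst heq
            have hlen : nx < pd.length := by
              by_contra hc
              rw [List.getElem?_eq_none (by omega)] at hg
              simp at hg
            rw [List.getElem?_set, if_pos rfl, if_pos hlen]
            rw [if_neg (fun hc => hmem hc.1)]
            rw [if_pos ⟨by simp, hg⟩]
          · rw [List.getElem?_set, if_neg heq]
            rw [if_neg (fun hc => hmem hc.1)]
            rw [if_neg (fun hc => by
              rcases List.mem_cons.mp hc.1 with h | h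
              · exact heq (by exact_mod_cast h.symm)
              · exact hmem h)]
      · rw [if_neg hg]
        by_cases hmem : ((t : Nat) : Int) ∈ xs
        · simp [hmem]
        · rw [if_neg (fun hc => hmem hc.1)]
          rw [if_neg (fun hc => by
            rcases List.mem_cons.mp hc.1 with h | h
            · rw [show nx = t from by exact_mod_cast h.symm] at hg
              exact hg hc.2
            · exact hmem h)]

theorem pyRange_nodup (a b s : Int) (hs : 0 < s) : (PySem.List.pyRange a b s).Nodup := by
  rw [PySem.List.pyRange_of_pos a b hs]
  apply List.Nodup.map ?_ List.nodup_range
  intro x y hxy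
  have h1 : s * (x : Int) = s * (y : Int) := by
    have h0 : a + s * (x : Int) = a + s * (y : Int) := hxy
    omega
  have h2 : (x : Int) = (y : Int) := mul_left_cancel₀ (by omega) h1
  exact_mod_cast h2

-- B-side: the sieve state after the outer loop has processed i = 2..k
def pvStateB (n k : Nat) : List Int :=
  (List.range n).map (fun j => if 2 ≤ j ∧ ¬ Nat.Prime j ∧ j.minFac ≤ k then (j.minFac : Int) else (j : Int))

def pvSpfFinal (n : Nat) : List Int :=
  (List.range n).map (fun j => if 2 ≤ j ∧ ¬ Nat.Prime j then (j.minFac : Int) else (j : Int))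

theorem pvStateB_getElem? (n k t : Nat) :
    (pvStateB n k)[t]? = if t < n then
      some (if 2 ≤ t ∧ ¬ Nat.Prime t ∧ t.minFac ≤ k then (t.minFac : Int) else (t : Int)) else none := by
  simp only [pvStateB, List.getElem?_map]
  by_cases h : t < n
  · rw [List.getElem?_range h]
    simp [h]
  · rw [List.getElem?_eq_none (by simp [List.length_range]; omega)]
    simp [h]

-- an entry still equals its index iff it has not been assigned yet
theorem pvStateB_self_iff (k t : Nat) :
    (if 2 ≤ t ∧ ¬ Nat.Prime t ∧ t.minFac ≤ k then ((t.minFac : Nat) : Int) else ((t : Nat) : Int)) = (t : Int) ↔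
      ¬ (2 ≤ t ∧ ¬ Nat.Prime t ∧ t.minFac ≤ k) := by
  split
  · rename_i hc
    constructor
    · intro he
      have : t.minFac = t := by exact_mod_cast he
      exact absurd (Nat.prime_def_minFac.mpr ⟨hc.1, this⟩) hc.2.1
    · intro hn
      exact absurd hc hn
  · rename_i hc
    simp [hc]

theorem initB (N : Int) : PySem.List.pyRange 0 N = pvStateB N.toNat 1 := by
  have hlen : (PySem.List.pyRange 0 N).length = N.toNat := by
    rw [PySem.List.pyRange_of_pos 0 N (by norm_num)]
    simp only [List.length_map, List.length_range]
    split_ifs with h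
    · simp
    · omega
  apply List.ext_getElem?
  intro t
  rw [pvStateB_getElem?]
  by_cases hlt : t < N.toNat
  · have ht : t < (PySem.List.pyRange 0 N).length := by omega
    rw [List.getElem?_eq_getElem ht, if_pos hlt]
    have hmf : ¬ (2 ≤ t ∧ ¬ Nat.Prime t ∧ t.minFac ≤ 1) := by
      rintro ⟨h2, hnp, hm⟩
      have := (Nat.minFac_prime (show t ≠ 1 by omega)).two_le
      omega
    rw [if_neg hmf]
    congr 1
    have := PySem.List.pyRange_of_pos 0 N (show (0:Int) < 1 by norm_num)
    rw [List.getElem_of_eq this]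
    simp
  · rw [if_neg hlt, List.getElem?_eq_none (by omega)]

theorem pvStateB_not_prime (n k : Nat) (hk : 1 ≤ k) (hp : ¬ Nat.Prime k) :
    pvStateB n (k-1) = pvStateB n k := by
  have hstep : ∀ j : Nat, (2 ≤ j ∧ ¬ Nat.Prime j ∧ j.minFac ≤ k) ↔ (2 ≤ j ∧ ¬ Nat.Prime j ∧ j.minFac ≤ k - 1) := by
    intro j
    constructor
    · rintro ⟨h2, hnp, hm⟩
      have hprime : j.minFac.Prime := Nat.minFac_prime (by omega)
      have : j.minFac ≠ k := fun he => hp (he ▸ hprime)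
      exact ⟨h2, hnp, by omega⟩
    · rintro ⟨h2, hnp, hm⟩
      exact ⟨h2, hnp, by omega⟩
  simp only [pvStateB]
  apply List.map_congr_left
  intro j _
  by_cases h : 2 ≤ j ∧ ¬ Nat.Prime j ∧ j.minFac ≤ k
  · rw [if_pos ((hstep j).mp h), if_pos h]
  · rw [if_neg (fun hc => h ((hstep j).mpr hc)), if_neg h]

theorem innerB (N : Int) (i : Nat) (hp : Nat.Prime i) (hiN : ((i:Int)) * i < N) :
    (PySem.List.pyRange ((i:Int) * i) N i).foldl
      (fun spf j => if PySem.List.pyGet? spf j = some j then spf.set j.toNat (i:Int) else spf)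
      (pvStateB N.toNat (i-1)) = pvStateB N.toNat i := by
  have hi2 : 2 ≤ i := hp.two_le
  have hipos : (0:Int) < (i:Int) := by exact_mod_cast hp.pos
  apply List.ext_getElem?
  intro t
  rw [foldl_cset _ _ _ (fun j hj => by
        have := (PySem.List.mem_pyRange_iff_of_pos hipos j).mp hj
        nlinarith [this.1]) (pyRange_nodup _ _ _ hipos) t]
  rw [pvStateB_getElem?, pvStateB_getElem?]
  by_cases hlt : t < N.toNat
  · rw [if_pos hlt, if_pos hlt]
    have hmem_iff : ((t:Nat):Int) ∈ PySem.List.pyRange ((i:Int) * i) N i ↔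
        i * i ≤ t ∧ i ∣ t := by
      rw [PySem.List.mem_pyRange_iff_of_pos hipos]
      constructor
      · rintro ⟨ha, hb, hc⟩
        have h1 : (i:Int) ∣ (t:Int) := (dvd_sub_left ⟨(i:Int), rfl⟩).mp hc
        exact ⟨by exact_mod_cast ha, by exact_mod_cast h1⟩
      · rintro ⟨ha, hb⟩
        refine ⟨by exact_mod_cast ha, by omega, (dvd_sub_left ⟨(i:Int), rfl⟩).mpr (by exact_mod_cast hb)⟩
    simp only [Option.some.injEq, hmem_iff, pvStateB_self_iff]
    by_cases hw : (i * i ≤ t ∧ i ∣ t) ∧ ¬ (2 ≤ t ∧ ¬ Nat.Prime t ∧ t.minFac ≤ i - 1)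
    · rw [if_pos hw]
      obtain ⟨⟨hsq, hdvd⟩, hun⟩ := hw
      have ht2 : 2 ≤ t := by nlinarith
      have hit : i < t := by nlinarith
      have hnp : ¬ Nat.Prime t := by
        intro hpt
        rcases (Nat.Prime.eq_one_or_self_of_dvd hpt i hdvd) with h | h <;> omega
      have hle : t.minFac ≤ i := Nat.minFac_le_of_dvd hi2 hdvd
      have hge : ¬ t.minFac ≤ i - 1 := fun hc => hun ⟨ht2, hnp, hc⟩
      have heq : t.minFac = i := by omega
      rw [if_pos ⟨ht2, hnp, by omega⟩, heq]
    · rw [if_neg hw]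
      congr 1
      by_cases ha : 2 ≤ t ∧ ¬ Nat.Prime t ∧ t.minFac ≤ i - 1
      · rw [if_pos ha, if_pos ⟨ha.1, ha.2.1, by omega⟩]
      · rw [if_neg ha]
        rw [if_neg ?_]
        rintro ⟨h2, hnp, hmi⟩
        have hgt : ¬ t.minFac ≤ i - 1 := fun hc => ha ⟨h2, hnp, hc⟩
        have heq : t.minFac = i := by omega
        have hdvd : i ∣ t := heq ▸ Nat.minFac_dvd t
        have hsq : i * i ≤ t := by
          have := Nat.minFac_sq_le_self (show 0 < t by omega) hnp
          calc i * i = t.minFac * t.minFac := by rw [heq]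
            _ = t.minFac ^ 2 := (sq t.minFac).symm
            _ ≤ t := this
        exact hw ⟨⟨hsq, hdvd⟩, ha⟩
  · rw [if_neg hlt, if_neg hlt]
    simp

theorem pvSpfFinal_getElem? (n t : Nat) :
    (pvSpfFinal n)[t]? = if t < n then
      some (if 2 ≤ t ∧ ¬ Nat.Prime t then (t.minFac : Int) else (t : Int)) else none := by
  simp only [pvSpfFinal, List.getElem?_map]
  by_cases h : t < n
  · rw [List.getElem?_range h]
    simp [h]
  · rw [List.getElem?_eq_none (by simp [List.length_range]; omega)]
    simp [h]

theorem spfLoop_spec (N i : Int) (spf : List Int) : 2 ≤ i →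
    spf = pvStateB N.toNat (i.toNat - 1) → pvSpfLoop N i spf = pvSpfFinal N.toNat := by
  fun_induction pvSpfLoop N i spf with
  | case1 i spf h ih =>
      intro hi2 hspf
      obtain ⟨ni, rfl⟩ : ∃ ni : Nat, i = ((ni : Nat) : Int) := ⟨i.toNat, by omega⟩
      simp only [Int.toNat_natCast] at hspf
      subst hspf
      have hni2 : 2 ≤ ni := by exact_mod_cast hi2
      have hniN : ((ni:Nat):Int) < N := by nlinarith
      have hlt : ni < N.toNat := by omega
      apply ih (by omega)
      have harg : (((ni:Nat):Int) + 1).toNat - 1 = ni := by omega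
      rw [harg, PySem.List.pyGet?_natCast, pvStateB_getElem?, if_pos hlt]
      by_cases hprime : Nat.Prime ni
      · have hcond : ¬ (2 ≤ ni ∧ ¬ Nat.Prime ni ∧ ni.minFac ≤ ni - 1) := fun hc => hc.2.1 hprime
        rw [if_neg hcond]
        rw [dif_pos rfl]
        exact innerB N ni hprime h
      · have hcomp : 2 ≤ ni ∧ ¬ Nat.Prime ni ∧ ni.minFac ≤ ni - 1 := by
          refine ⟨hni2, hprime, ?_⟩
          have hd := Nat.minFac_dvd ni
          have hle := Nat.minFac_le (show 0 < ni by omega)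
          have hne : ni.minFac ≠ ni := fun he => hprime (Nat.prime_def_minFac.mpr ⟨hni2, he⟩)
          omega
        rw [if_pos hcomp]
        rw [dif_neg ?_]
        · exact pvStateB_not_prime N.toNat ni (by omega) hprime
        · intro hc
          have h1 : ni.minFac = ni := by
            have h2 := Option.some.inj hc
            exact_mod_cast h2
          exact hprime (Nat.prime_def_minFac.mpr ⟨hni2, h1⟩)
  | case2 i spf h =>
      intro hi2 hspf
      subst hspf
      apply List.ext_getElem?
      intro t
      rw [pvStateB_getElem?, pvSpfFinal_getElem?]
      by_cases hlt : t < N.toNat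
      · rw [if_pos hlt, if_pos hlt]
        congr 1
        by_cases hc : 2 ≤ t ∧ ¬ Nat.Prime t
        · have hm : t.minFac ≤ i.toNat - 1 := by
            have hsq := Nat.minFac_sq_le_self (show 0 < t by omega) hc.2
            have htii : (t:Int) < i * i := by omega
            have hcast : ((i.toNat : Nat) : Int) = i := by omega
            have h2 : t < i.toNat * i.toNat := by
              have : (t:Int) < ((i.toNat : Nat) : Int) * ((i.toNat : Nat) : Int) := by
                rw [hcast]; exact htii
              exact_mod_cast this
            have h3 : t.minFac < i.toNat := by
              by_contra hx
              have h4 : i.toNat * i.toNat ≤ t.minFac * t.minFac :=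
                Nat.mul_le_mul (by omega) (by omega)
              have h5 : t.minFac ^ 2 = t.minFac * t.minFac := sq t.minFac
              omega
            omega
          rw [if_pos ⟨hc.1, hc.2, hm⟩, if_pos hc]
        · rw [if_neg (fun hx => hc ⟨hx.1, hx.2.1⟩), if_neg hc]
      · rw [if_neg hlt, if_neg hlt]

theorem spf_eq (N : Int) : pvSpfLoop N 2 (PySem.List.pyRange 0 N) = pvSpfFinal N.toNat := by
  apply spfLoop_spec N 2 _ (by norm_num)
  rw [initB]
  rfl

-- B-side: DP state after filling entries 2..k
def pvStateD (n k : Nat) : List Int :=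
  (List.range n).map (fun t => if t ≤ k then (pvG t t : Int) else 1)

theorem pvStateD_length (n k : Nat) : (pvStateD n k).length = n := by
  simp [pvStateD]

theorem pvStateD_getElem? (n k t : Nat) :
    (pvStateD n k)[t]? = if t < n then some (if t ≤ k then (pvG t t : Int) else 1) else none := by
  simp only [pvStateD, List.getElem?_map]
  by_cases h : t < n
  · rw [List.getElem?_range h]
    simp [h]
  · rw [List.getElem?_eq_none (by simp [List.length_range]; omega)]
    simp [h]

theorem initD (n : Nat) : List.replicate n (1:Int) = pvStateD n 1 := by
  apply List.ext_getElem?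
  intro t
  rw [pvStateD_getElem?]
  by_cases hlt : t < n
  · rw [List.getElem?_replicate, if_pos hlt, if_pos hlt]
    by_cases ht : t ≤ 1
    · rw [if_pos ht]
      interval_cases t
      · rfl
      · rw [pvG_one_left]
        norm_num
    · rw [if_neg ht]
  · rw [List.getElem?_replicate, if_neg hlt, if_neg hlt]

theorem outerD (N : Int) : ∀ b : Int, 2 ≤ b → b ≤ N →
    (PySem.List.pyRange 2 b).foldl
      (fun res n =>
        res.set n.toNat (max ((PySem.List.pyGet? (pvSpfFinal N.toNat) n).getD 0)
          ((PySem.List.pyGet? res (PySem.Int.floordiv n ((PySem.List.pyGet? (pvSpfFinal N.toNat) n).getD 0))).getD 0)))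
      (pvStateD N.toNat 1) = pvStateD N.toNat (b-1).toNat := by
  intro b hb
  induction b, hb using Int.le_induction with
  | base =>
      intro _
      rw [PySem.List.pyRange_of_pos 2 2 (by norm_num), if_neg (by omega)]
      rfl
  | succ b hb ih =>
      intro hbN
      rw [PySem.List.pyRange_one_succ_right (by omega), List.foldl_append, ih (by omega)]
      simp only [List.foldl_cons, List.foldl_nil]
      obtain ⟨nb, rfl⟩ : ∃ nb : Nat, b = ((nb:Nat):Int) := ⟨b.toNat, by omega⟩
      have hnb2 : 2 ≤ nb := by exact_mod_cast hb
      have hlt : nb < N.toNat := by omega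
      have h1 : (((nb:Nat):Int) - 1).toNat = nb - 1 := by omega
      have h2 : (((nb:Nat):Int) + 1 - 1).toNat = nb := by omega
      rw [h1, h2, PySem.List.pyGet?_natCast, pvSpfFinal_getElem?, if_pos hlt]
      have hpv : (if 2 ≤ nb ∧ ¬ Nat.Prime nb then ((nb.minFac : Nat) : Int) else ((nb:Nat):Int)) =
          ((nb.minFac : Nat):Int) := by
        split
        · rfl
        · rename_i hc
          have hprime : Nat.Prime nb := by
            by_contra hnp
            exact hc ⟨hnb2, hnp⟩
          rw [hprime.minFac_eq]
      rw [hpv]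
      simp only [Option.getD_some]
      rw [PySem.Int.floordiv_natCast, PySem.List.pyGet?_natCast, pvStateD_getElem?]
      have hmf2 : 2 ≤ nb.minFac := (Nat.minFac_prime (by omega)).two_le
      have hmlt : nb / nb.minFac < nb := Nat.div_lt_self (by omega) (by omega)
      rw [if_pos (show nb / nb.minFac < N.toNat by omega),
        if_pos (show nb / nb.minFac ≤ nb - 1 by omega)]
      simp only [Option.getD_some, Int.toNat_natCast]
      rw [← Nat.cast_max, ← pvG_key nb hnb2]
      apply List.ext_getElem?
      intro t
      rw [List.getElem?_set, pvStateD_getElem?, pvStateD_getElem?, pvStateD_length]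
      by_cases he : nb = t
      · subst he
        rw [if_pos rfl, if_pos hlt, if_pos hlt, if_pos (le_refl nb)]
      · rw [if_neg he]
        by_cases hltt : t < N.toNat
        · rw [if_pos hltt, if_pos hltt]
          congr 1
          by_cases hts : t ≤ nb - 1
          · rw [if_pos hts, if_pos (by omega)]
          · rw [if_neg hts, if_neg (by omega)]
        · rw [if_neg hltt, if_neg hltt]

theorem pvStateD_eq_target (N : Int) (k : Nat) (hk : ∀ t, t < N.toNat → t ≤ k) :
    pvStateD N.toNat k = pvTarget N.toNat := by
  apply List.ext_getElem?
  intro t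
  rw [pvStateD_getElem?]
  unfold pvTarget
  by_cases hlt : t < N.toNat
  · rw [List.getElem?_map, List.getElem?_range hlt, if_pos hlt, if_pos (hk t hlt)]
    rfl
  · rw [List.getElem?_map, List.getElem?_eq_none (by simp [List.length_range]; omega), if_neg hlt]
    rfl

theorem portB_eq (N : Int) : get_largest_prime_divisors_alt N = pvTarget N.toNat := by
  have hrfl : get_largest_prime_divisors_alt N =
      (PySem.List.pyRange 2 N).foldl
        (fun res n =>
          res.set n.toNat (max ((PySem.List.pyGet? (pvSpfLoop N 2 (PySem.List.pyRange 0 N)) n).getD 0)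
            ((PySem.List.pyGet? res (PySem.Int.floordiv n
              ((PySem.List.pyGet? (pvSpfLoop N 2 (PySem.List.pyRange 0 N)) n).getD 0))).getD 0)))
        (List.replicate N.toNat 1) := rfl
  rw [hrfl, spf_eq, initD]
  by_cases hN2 : 2 ≤ N
  · rw [outerD N N hN2 le_rfl]
    exact pvStateD_eq_target N _ (fun t ht => by omega)
  · have hre : PySem.List.pyRange 2 N = [] := by
      rw [PySem.List.pyRange_of_pos 2 N (by norm_num), if_neg (by omega)]
      rfl
    rw [hre, List.foldl_nil]
    exact pvStateD_eq_target N 1 (fun t ht => by omega)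

-- ===== VERDICT (by name: the statement is the Claim_ definition above) =====
theorem get_largest_prime_divisors_spec : Claim_equal_get_largest_prime_divisors := by
  intro N _
  unfold Spec_get_largest_prime_divisors
  rw [portA_eq, portB_eq]
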